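-- pv_equiv track=rewrite | github.com/Arsany-Naim/refactoring-engine-EduCode | educode_refactoring/engine/progression_tracker.py | _curriculum_progress
-- ===== SOURCE A (Python) =====
-- SMELL_CURRICULUM = [
--     # Tier 1 — Beginner: immediately visible
--     "LongMethod",
--     "LongParameterList",
--     "DeadCode",
--     "DeepNesting",
--     "DuplicatedCode",
--
--     # Tier 2 — Intermediate: requires understanding OOP
--     "DataClass",
--     "FeatureEnvy",
--     "LazyClass",
--     "ComplexConditional",
--     "MessageChain",
--
--     # Tier 3 — Advanced: architectural smells
--     "GodClass",
--     "HighCoupling",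
--     "MiddleMan",
--     "RefusedBequest",
--     "ShotgunSurgery",
-- ]
--
-- def _curriculum_progress(completed: set) -> dict:
--     """Returns tier-by-tier progress."""
--     tier1 = SMELL_CURRICULUM[:5]
--     tier2 = SMELL_CURRICULUM[5:10]
--     tier3 = SMELL_CURRICULUM[10:]
--     return {
--         "tier1_beginner": {
--             "completed": len([s for s in tier1 if s in completed]),
--             "total": len(tier1)
--         },
--         "tier2_intermediate": {
--             "completed": len([s for s in tier2 if s in completed]),
--             "total": len(tier2)
--         },
--         "tier3_advanced": {
--             "completed": len([s for s in tier3 if s in completed]),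
--             "total": len(tier3)
--         }
--     }
-- ===== SOURCE B (Python) =====
-- SMELL_CURRICULUM = [
--     "LongMethod",
--     "LongParameterList",
--     "DeadCode",
--     "DeepNesting",
--     "DuplicatedCode",
--     "DataClass",
--     "FeatureEnvy",
--     "LazyClass",
--     "ComplexConditional",
--     "MessageChain",
--     "GodClass",
--     "HighCoupling",
--     "MiddleMan",
--     "RefusedBequest",
--     "ShotgunSurgery",
-- ]
--
-- # tier number (1, 2 or 3) of each curriculum smell, built once
-- _TIER_OF = {s: i // 5 + 1 for i, s in enumerate(SMELL_CURRICULUM)}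
--
--
-- def _curriculum_progress(completed: set) -> dict:
--     """Single pass over `completed`: look up each smell's tier and count it."""
--     c1 = c2 = c3 = 0
--     for s in completed:
--         t = _TIER_OF.get(s)
--         if t == 1:
--             c1 += 1
--         elif t == 2:
--             c2 += 1
--         elif t == 3:
--             c3 += 1
--     return {
--         "tier1_beginner": {"completed": c1, "total": 5},
--         "tier2_intermediate": {"completed": c2, "total": 5},
--         "tier3_advanced": {"completed": c3, "total": 5},
--     }
-- ===== Notes on version B (the rewrite author's own statement) =====
-- stated objective: alternative
-- what changed: A filters the three curriculum tier slices against `completed` (three membership passes over the curriculum); B makes a single pass over `completed`, looking each smell up in a precomputed smell-to-tier index and incrementing one of three counters.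
import Mathlib
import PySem

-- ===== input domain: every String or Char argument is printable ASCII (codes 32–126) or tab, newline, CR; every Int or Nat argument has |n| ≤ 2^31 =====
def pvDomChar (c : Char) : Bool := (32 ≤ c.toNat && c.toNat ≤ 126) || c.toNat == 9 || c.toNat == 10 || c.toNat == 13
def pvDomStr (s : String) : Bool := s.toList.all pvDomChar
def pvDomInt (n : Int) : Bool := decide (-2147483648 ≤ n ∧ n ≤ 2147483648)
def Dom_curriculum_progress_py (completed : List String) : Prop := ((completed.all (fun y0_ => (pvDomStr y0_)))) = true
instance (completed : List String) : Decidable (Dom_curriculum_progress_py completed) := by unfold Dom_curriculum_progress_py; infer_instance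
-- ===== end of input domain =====

-- B replaces A's three filter passes over the curriculum with one pass over `completed`
-- using a precomputed smell→tier index (objective: alternative decomposition).
-- Python's `completed` is a set; the List String here holds its distinct elements.

-- ===== PORT A =====
def smellCurriculum : List String :=
  ["LongMethod", "LongParameterList", "DeadCode", "DeepNesting", "DuplicatedCode",
   "DataClass", "FeatureEnvy", "LazyClass", "ComplexConditional", "MessageChain",
   "GodClass", "HighCoupling", "MiddleMan", "RefusedBequest", "ShotgunSurgery"]

def curriculum_progress_py (completed : List String) : List (String × List (String × Int)) :=
  let tier1 := PySem.List.slice smellCurriculum none (some 5)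
  let tier2 := PySem.List.slice smellCurriculum (some 5) (some 10)
  let tier3 := PySem.List.slice smellCurriculum (some 10) none
  [("tier1_beginner",
      [("completed", ((tier1.filter (fun s => completed.contains s)).length : Int)),
       ("total", (tier1.length : Int))]),
   ("tier2_intermediate",
      [("completed", ((tier2.filter (fun s => completed.contains s)).length : Int)),
       ("total", (tier2.length : Int))]),
   ("tier3_advanced",
      [("completed", ((tier3.filter (fun s => completed.contains s)).length : Int)),
       ("total", (tier3.length : Int))])]

-- ===== PORT B =====
-- _TIER_OF = {s: i // 5 + 1 for i, s in enumerate(SMELL_CURRICULUM)}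
def tierOf : PySem.Dict String Int :=
  PySem.Dict.ofList
    [("LongMethod", 1), ("LongParameterList", 1), ("DeadCode", 1), ("DeepNesting", 1),
     ("DuplicatedCode", 1), ("DataClass", 2), ("FeatureEnvy", 2), ("LazyClass", 2),
     ("ComplexConditional", 2), ("MessageChain", 2), ("GodClass", 3), ("HighCoupling", 3),
     ("MiddleMan", 3), ("RefusedBequest", 3), ("ShotgunSurgery", 3)]

def curriculum_progress_py_alt (completed : List String) : List (String × List (String × Int)) :=
  let cs := completed.foldl (fun (c : Int × Int × Int) s =>
      let t := tierOf.get? s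
      if t == some 1 then (c.1 + 1, c.2.1, c.2.2)
      else if t == some 2 then (c.1, c.2.1 + 1, c.2.2)
      else if t == some 3 then (c.1, c.2.1, c.2.2 + 1)
      else c) (0, 0, 0)
  [("tier1_beginner", [("completed", cs.1), ("total", 5)]),
   ("tier2_intermediate", [("completed", cs.2.1), ("total", 5)]),
   ("tier3_advanced", [("completed", cs.2.2), ("total", 5)])]

-- ===== PRECONDITION & SPEC =====
-- Pre_ requires distinct elements: the Python parameter is a set, so a list with
-- duplicates represents no Python input at all (per the set→List-of-distinct convention).
def Pre_curriculum_progress_py (completed : List String) : Prop := completed.Nodup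
instance (completed : List String) : Decidable (Pre_curriculum_progress_py completed) := by unfold Pre_curriculum_progress_py; infer_instance

def pvWitness_curriculum_progress_py : List String := ["LongMethod", "GodClass", "foo"]

def Spec_curriculum_progress_py (completed : List String) (out : List (String × List (String × Int))) : Prop := out = curriculum_progress_py_alt completed
instance (completed : List String) (out : List (String × List (String × Int))) : Decidable (Spec_curriculum_progress_py completed out) := by unfold Spec_curriculum_progress_py; infer_instance

-- ===== CLAIM (what is proved, stated in full; the proofs are below) =====
def Claim_equal_curriculum_progress_py : Prop := ∀ (completed : List String), Dom_curriculum_progress_py completed → Pre_curriculum_progress_py completed → Spec_curriculum_progress_py completed (curriculum_progress_py completed)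

-- ===== LEMMAS AND PROOFS =====

def tier1L : List String :=
  ["LongMethod", "LongParameterList", "DeadCode", "DeepNesting", "DuplicatedCode"]
def tier2L : List String :=
  ["DataClass", "FeatureEnvy", "LazyClass", "ComplexConditional", "MessageChain"]
def tier3L : List String :=
  ["GodClass", "HighCoupling", "MiddleMan", "RefusedBequest", "ShotgunSurgery"]

lemma tierOf_cases (s : String) :
    tierOf.get? s = if s ∈ tier1L then some 1 else if s ∈ tier2L then some 2
      else if s ∈ tier3L then some 3 else none := by
  by_cases h : s ∈ smellCurriculum
  · simp only [smellCurriculum, List.mem_cons, List.not_mem_nil, or_false] at h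
    rcases h with h|h|h|h|h|h|h|h|h|h|h|h|h|h|h <;> subst h <;> decide
  · have hs : ∀ k : String, k ∈ smellCurriculum → (k == s) = false := by
      intro k hk
      exact beq_eq_false_iff_ne.mpr (fun he => h (he ▸ hk))
    have m1 : s ∉ tier1L := fun hm => h (by revert hm; intro hm; fin_cases hm <;> decide)
    have m2 : s ∉ tier2L := fun hm => h (by revert hm; intro hm; fin_cases hm <;> decide)
    have m3 : s ∉ tier3L := fun hm => h (by revert hm; intro hm; fin_cases hm <;> decide)
    rw [if_neg m1, if_neg m2, if_neg m3]
    rw [show tierOf = PySem.Dict.mk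
      [("LongMethod", 1), ("LongParameterList", 1), ("DeadCode", 1), ("DeepNesting", 1),
       ("DuplicatedCode", 1), ("DataClass", 2), ("FeatureEnvy", 2), ("LazyClass", 2),
       ("ComplexConditional", 2), ("MessageChain", 2), ("GodClass", 3), ("HighCoupling", 3),
       ("MiddleMan", 3), ("RefusedBequest", 3), ("ShotgunSurgery", 3)] from rfl]
    simp only [PySem.Dict.get?_mk_cons,
      hs "LongMethod" (by decide), hs "LongParameterList" (by decide),
      hs "DeadCode" (by decide), hs "DeepNesting" (by decide),
      hs "DuplicatedCode" (by decide), hs "DataClass" (by decide),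
      hs "FeatureEnvy" (by decide), hs "LazyClass" (by decide),
      hs "ComplexConditional" (by decide), hs "MessageChain" (by decide),
      hs "GodClass" (by decide), hs "HighCoupling" (by decide),
      hs "MiddleMan" (by decide), hs "RefusedBequest" (by decide),
      hs "ShotgunSurgery" (by decide), Bool.false_eq_true, if_false]
    rfl

lemma disj1 (s : String) (h : s ∈ tier1L) : s ∉ tier2L ∧ s ∉ tier3L := by
  fin_cases h <;> decide
lemma disj2 (s : String) (h : s ∈ tier2L) : s ∉ tier3L := by
  fin_cases h <;> decide

lemma fold_counts (completed : List String) (c : Int × Int × Int) :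
    completed.foldl (fun (c : Int × Int × Int) s =>
      let t := tierOf.get? s
      if t == some 1 then (c.1 + 1, c.2.1, c.2.2)
      else if t == some 2 then (c.1, c.2.1 + 1, c.2.2)
      else if t == some 3 then (c.1, c.2.1, c.2.2 + 1)
      else c) c
    = (c.1 + (completed.countP (· ∈ tier1L) : Int),
       c.2.1 + (completed.countP (· ∈ tier2L) : Int),
       c.2.2 + (completed.countP (· ∈ tier3L) : Int)) := by
  induction completed generalizing c with
  | nil => simp
  | cons s rest ih =>
    rw [List.foldl_cons, ih]
    simp only [List.countP_cons, tierOf_cases s]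
    by_cases h1 : s ∈ tier1L
    · obtain ⟨h2, h3⟩ := disj1 s h1
      simp only [h1, h2, h3]
      simp [Prod.ext_iff]
      ring
    · by_cases h2 : s ∈ tier2L
      · have h3 := disj2 s h2
        simp only [h1, h2, h3]
        simp [Prod.ext_iff]
        ring
      · by_cases h3 : s ∈ tier3L
        · simp only [h1, h2, h3]
          simp [Prod.ext_iff]
          ring
        · simp only [h1, h2, h3]
          simp

-- counting intersection both ways round, for duplicate-free lists
lemma count_swap (l T : List String) (hl : l.Nodup) (hT : T.Nodup) :
    (l.countP (· ∈ T) : Int) = ((T.filter (fun s => l.contains s)).length : Int) := by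
  congr 1
  rw [List.countP_eq_length_filter]
  have h1 : (l.filter (fun s => decide (s ∈ T))).toFinset.card
      = (l.filter (fun s => decide (s ∈ T))).length :=
    List.toFinset_card_of_nodup (hl.filter _)
  have h2 : (T.filter (fun s => l.contains s)).toFinset.card
      = (T.filter (fun s => l.contains s)).length :=
    List.toFinset_card_of_nodup (hT.filter _)
  rw [← h1, ← h2]
  congr 1
  ext x
  simp [and_comm]

theorem curriculum_progress_py_spec : Claim_equal_curriculum_progress_py := by
  intro completed _ hpre
  unfold Spec_curriculum_progress_py
  show curriculum_progress_py completed = curriculum_progress_py_alt completed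
  have hA : curriculum_progress_py completed =
    [("tier1_beginner",
        [("completed", ((tier1L.filter (fun s => completed.contains s)).length : Int)), ("total", 5)]),
     ("tier2_intermediate",
        [("completed", ((tier2L.filter (fun s => completed.contains s)).length : Int)), ("total", 5)]),
     ("tier3_advanced",
        [("completed", ((tier3L.filter (fun s => completed.contains s)).length : Int)), ("total", 5)])] := rfl
  rw [hA]
  unfold curriculum_progress_py_alt
  rw [fold_counts]
  have n1 : tier1L.Nodup := by decide
  have n2 : tier2L.Nodup := by decide
  have n3 : tier3L.Nodup := by decide
  simp only [count_swap completed tier1L hpre n1, count_swap completed tier2L hpre n2,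
    count_swap completed tier3L hpre n3, zero_add]
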